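-- pv_equiv track=rewrite | github.com/981377660LMT/algorithm-study | 9_排序和搜索/二分/经典题/填平后均摊/k次加1操作最大化最小值.py | maximizeMinValue
-- ===== SOURCE A (Python) =====
-- from typing import List
-- from itertools import accumulate
--
-- def maximizeMinValue(nums: List[int], k: int) -> int:
--     """k次加1操作,让最小值最大化,返回最小值"""
--     n = len(nums)
--     nums = sorted(nums)
--     preSum = [0] + list(accumulate(nums))
--     nums = [0] + nums
--
--     # !最右二分求最后能和哪个数齐平
--     left, right = 0, n
--     while left <= right:
--         mid = (left + right) // 2
--         diff = mid * nums[mid] - preSum[mid]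
--         if diff <= k:
--             left = mid + 1
--         else:
--             right = mid - 1
--
--     max_ = nums[right]
--     overflow = k - (right * nums[right] - preSum[right])
--     max_ += overflow // right if right else 0
--     return max_
-- ===== SOURCE B (Python) =====
-- def maximizeMinValue(nums, k):
--     """k次加1操作,让最小值最大化,返回最小值"""
--     a = sorted(nums)
--     right = 0  # rightmost index i (1-based) with leveling cost i*a[i-1]-sum(a[:i]) <= k
--     pre = 0    # prefix sum of the first `right` elements
--     s = 0
--     i = 0
--     for v in a:
--         i += 1
--         s += v
--         if i * v - s <= k:
--             right = i
--             pre = s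
--     if right == 0:
--         return 0
--     rem = k - (right * a[right - 1] - pre)
--     return a[right - 1] + rem // right
-- ===== Notes on version B (the rewrite author's own statement) =====
-- stated objective: simpler
-- what changed: Replaces the padded-list ([0]+nums, [0]+accumulate) binary search with a single incremental left-to-right scan that tracks the rightmost affordable leveling index and its prefix sum on the fly, dropping the auxiliary lists and the midpoint loop.
-- outside the precondition, e.g. on maximizeMinValue([1, 5], -1): A returns -5, B returns 0
import Mathlib
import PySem

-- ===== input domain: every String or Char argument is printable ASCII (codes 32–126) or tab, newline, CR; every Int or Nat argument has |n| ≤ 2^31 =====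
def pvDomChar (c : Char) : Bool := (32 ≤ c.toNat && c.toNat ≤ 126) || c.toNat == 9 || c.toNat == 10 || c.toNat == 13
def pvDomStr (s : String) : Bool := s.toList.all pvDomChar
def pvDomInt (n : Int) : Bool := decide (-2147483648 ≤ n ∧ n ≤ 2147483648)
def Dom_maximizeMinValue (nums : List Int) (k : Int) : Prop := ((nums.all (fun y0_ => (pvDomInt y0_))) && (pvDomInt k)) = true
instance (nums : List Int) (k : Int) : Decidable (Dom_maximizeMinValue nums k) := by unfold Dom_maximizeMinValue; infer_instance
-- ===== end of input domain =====

-- B replaces A's padded lists + binary search by one incremental left-to-right scan; same value on every input with k ≥ 0.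

-- ===== PORT A =====
-- xs[i] (possibly negative index); every access A makes is in range, so the default is never used
def pvGet (xs : List Int) (i : Int) : Int := PySem.List.pyGetD xs i 0

-- itertools.accumulate
def pvAccum (s : Int) : List Int → List Int
  | [] => []
  | x :: xs => (s + x) :: pvAccum (s + x) xs

-- the `while left <= right` binary-search loop; returns the final `right`
def pvBisect (ns ps : List Int) (k left right : Int) : Int :=
  if _h : left ≤ right then
    let mid := PySem.Int.floordiv (left + right) 2
    if mid * pvGet ns mid - pvGet ps mid ≤ k then
      pvBisect ns ps k (mid + 1) right
    else
      pvBisect ns ps k left (mid - 1)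
  else right
termination_by (right + 1 - left).toNat
decreasing_by
  · have := PySem.Int.floordiv_two_mid_bounds (lo := left) (hi := right) _h
    omega
  · have := PySem.Int.floordiv_two_mid_bounds (lo := left) (hi := right) _h
    omega

def maximizeMinValue (nums : List Int) (k : Int) : Int :=
  let n : Int := nums.length
  let a := PySem.List.sorted nums (fun x => x) false
  let preSum := 0 :: pvAccum 0 a
  let ns := 0 :: a
  let right := pvBisect ns preSum k 0 n
  let max_ := pvGet ns right
  let overflow := k - (right * pvGet ns right - pvGet preSum right)
  max_ + (if right ≠ 0 then PySem.Int.floordiv overflow right else 0)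

-- ===== PORT B =====
-- the `for v in a` scan: state (i, s, (right, pre))
def pvScan (k : Int) : List Int → Int → Int → Int × Int → Int × Int
  | [], _, _, st => st
  | v :: rest, i, s, st =>
      pvScan k rest (i + 1) (s + v)
        (if (i + 1) * v - (s + v) ≤ k then (i + 1, s + v) else st)

def maximizeMinValue_alt (nums : List Int) (k : Int) : Int :=
  let a := PySem.List.sorted nums (fun x => x) false
  let st := pvScan k a 0 0 (0, 0)
  if st.1 = 0 then 0
  else
    let av := pvGet a (st.1 - 1)
    let rem := k - (st.1 * av - st.2)
    av + PySem.Int.floordiv rem st.1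

-- ===== PRECONDITION & SPEC =====
-- Pre_ restricts to the natural domain k ≥ 0 (k counts increment operations); for k < 0 A's
-- result comes from Python's negative-index wraparound at right = -1 and is an accident of the
-- implementation, while B returns 0.
def Pre_maximizeMinValue (nums : List Int) (k : Int) : Prop := 0 ≤ k
instance (nums : List Int) (k : Int) : Decidable (Pre_maximizeMinValue nums k) := by
  unfold Pre_maximizeMinValue; infer_instance

def pvWitness_maximizeMinValue : List Int × Int := ([3, 1, 2], 4)

def Spec_maximizeMinValue (nums : List Int) (k : Int) (out : Int) : Prop := out = maximizeMinValue_alt nums k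
instance (nums : List Int) (k : Int) (out : Int) : Decidable (Spec_maximizeMinValue nums k out) := by unfold Spec_maximizeMinValue; infer_instance

-- ===== CLAIM (what is proved, stated in full; the proofs are below) =====
def Claim_equal_maximizeMinValue : Prop := ∀ (nums : List Int) (k : Int), Dom_maximizeMinValue nums k → Pre_maximizeMinValue nums k → Spec_maximizeMinValue nums k (maximizeMinValue nums k)

-- ===== LEMMAS AND PROOFS =====

-- leveling cost for the first j elements of the sorted list (1-based j)
def pvC (a : List Int) (j : Nat) : Int := (j : Int) * a.getD (j - 1) 0 - (a.take j).sum

lemma pv_sum_take_succ (a : List Int) (i : Nat) (h : i < a.length) :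
    (a.take (i + 1)).sum = (a.take i).sum + a.getD i 0 := by
  rw [List.take_add_one, List.sum_append, List.getD_eq_getElem a 0 h]
  simp [List.getElem?_eq_getElem h]

lemma pvAccum_getD (a : List Int) : ∀ (s : Int) (i : Nat), i < a.length →
    (pvAccum s a).getD i 0 = s + (a.take (i + 1)).sum := by
  induction a with
  | nil => intro s i h; simp at h
  | cons x xs ih =>
      intro s i h
      cases i with
      | zero => simp [pvAccum]
      | succ m =>
          simp only [pvAccum, List.getD_cons_succ, List.take_succ_cons, List.sum_cons]
          rw [ih (s + x) m (by simpa using h)]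
          ring

lemma pvGet_ps (a : List Int) (j : Nat) (h : j ≤ a.length) :
    pvGet (0 :: pvAccum 0 a) (j : Int) = (a.take j).sum := by
  cases j with
  | zero => simp [pvGet]
  | succ m =>
      simp only [pvGet, PySem.List.pyGetD_natCast, List.getD_cons_succ]
      rw [pvAccum_getD a 0 m (by omega)]
      simp

lemma pvGet_ns (a : List Int) (m : Nat) :
    pvGet (0 :: a) ((m : Int) + 1) = a.getD m 0 := by
  have h : ((m : Int) + 1) = ((m + 1 : Nat) : Int) := by push_cast; ring
  unfold pvGet
  rw [h, PySem.List.pyGetD_natCast]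
  rfl

lemma pv_bridge (a : List Int) (i : Int) (h0 : 0 ≤ i) (hn : i ≤ a.length) :
    i * pvGet (0 :: a) i - pvGet (0 :: pvAccum 0 a) i = pvC a i.toNat := by
  obtain ⟨j, rfl⟩ : ∃ j : Nat, i = (j : Int) := ⟨i.toNat, by omega⟩
  rw [pvGet_ps a j (by exact_mod_cast hn)]
  cases j with
  | zero => simp [pvGet, pvC]
  | succ m =>
      have h1 : ((m + 1 : Nat) : Int) = (m : Int) + 1 := by push_cast; ring
      rw [h1, pvGet_ns]
      simp [pvC]

lemma pvC_step (a : List Int)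
    (hpw : ∀ p : Nat, ∀ hp1 : p + 1 < a.length, a[p]'(by omega) ≤ a[p + 1]) (m : Nat)
    (h : m + 1 ≤ a.length) :
    pvC a m ≤ pvC a (m + 1) := by
  cases m with
  | zero =>
      have h0 : 0 < a.length := by omega
      simp [pvC, pv_sum_take_succ a 0 h0]
  | succ p =>
      have hp1 : p + 1 < a.length := by omega
      have hp : p < a.length := by omega
      have hmono : a[p] ≤ a[p + 1] := hpw p hp1
      simp only [pvC, Nat.add_sub_cancel]
      rw [pv_sum_take_succ a (p + 1) hp1, pv_sum_take_succ a p hp,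
          List.getD_eq_getElem a 0 hp1, List.getD_eq_getElem a 0 hp]
      have hc : (0 : Int) ≤ ((p : Int) + 1) * (a[p + 1] - a[p]) := by
        apply mul_nonneg (by push_cast; omega) (by omega)
      push_cast
      nlinarith [hc]

lemma pvC_mono (a : List Int)
    (hpw : ∀ p : Nat, ∀ hp1 : p + 1 < a.length, a[p]'(by omega) ≤ a[p + 1]) (i j : Nat)
    (hij : i ≤ j) (hj : j ≤ a.length) :
    pvC a i ≤ pvC a j := by
  induction j with
  | zero =>
      have : i = 0 := by omega
      simp [this]
  | succ m ih =>
      rcases Nat.lt_or_ge i (m + 1) with h | h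
      · exact le_trans (ih (by omega) (by omega)) (pvC_step a hpw m hj)
      · have : i = m + 1 := by omega
        simp [this]

lemma pvBisect_char (ns ps : List Int) (k n : Int)
    (hmono : ∀ i j : Int, 0 ≤ i → i ≤ j → j ≤ n →
      i * pvGet ns i - pvGet ps i ≤ j * pvGet ns j - pvGet ps j) :
    ∀ (left right : Int), 0 ≤ left → right ≤ n → left ≤ right + 1 →
    (∀ i : Int, 0 ≤ i → i < left → i * pvGet ns i - pvGet ps i ≤ k) →
    (∀ i : Int, right < i → i ≤ n → ¬ (i * pvGet ns i - pvGet ps i ≤ k)) →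
    (-1 ≤ pvBisect ns ps k left right ∧ pvBisect ns ps k left right ≤ n ∧
     (∀ i : Int, 0 ≤ i → i ≤ pvBisect ns ps k left right → i * pvGet ns i - pvGet ps i ≤ k) ∧
     (∀ i : Int, pvBisect ns ps k left right < i → i ≤ n → ¬ (i * pvGet ns i - pvGet ps i ≤ k))) := by
  intro left right
  induction left, right using pvBisect.induct ns ps k with
  | case1 left right hlr mid htest ih =>
      intro h0 hrn hlr1 hL hR
      have hmid := PySem.Int.floordiv_two_mid_bounds (lo := left) (hi := right) hlr
      rw [pvBisect]
      simp only [hlr, dite_true]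
      rw [if_pos htest]
      exact ih (by omega) hrn (by omega)
        (fun i hi0 hi => by
          rcases Int.lt_or_le i left with h | h
          · exact hL i hi0 h
          · exact le_trans (hmono i mid hi0 (by omega) (by omega)) htest)
        hR
  | case2 left right hlr mid htest ih =>
      intro h0 hrn hlr1 hL hR
      have hmid := PySem.Int.floordiv_two_mid_bounds (lo := left) (hi := right) hlr
      rw [pvBisect]
      simp only [hlr, dite_true]
      rw [if_neg htest]
      exact ih h0 (by omega) (by omega) hL
        (fun i hi hin hci => by
          rcases Int.lt_or_le i (right + 1) with h | h
          · exact htest (le_trans (hmono mid i (by omega) (by omega) hin) hci)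
          · exact hR i (by omega) hin hci)
  | case3 left right hlr =>
      intro h0 hrn hlr1 hL hR
      rw [pvBisect]
      simp only [hlr, dite_false]
      exact ⟨by omega, hrn, fun i hi0 hi => hL i hi0 (by omega), hR⟩

lemma pvScan_char (k : Int) (a : List Int) :
    ∀ (d i : Nat) (st : Int × Int), a.length - i ≤ d → st.1 ≤ (i : Int) →
    ((pvScan k (a.drop i) (i : Int) ((a.take i).sum) st = st ∨
      ∃ j : Nat, i < j ∧ j ≤ a.length ∧
        pvScan k (a.drop i) (i : Int) ((a.take i).sum) st = ((j : Int), (a.take j).sum) ∧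
        pvC a j ≤ k) ∧
     (∀ j : Nat, i < j → j ≤ a.length → pvC a j ≤ k →
        (j : Int) ≤ (pvScan k (a.drop i) (i : Int) ((a.take i).sum) st).1) ∧
     st.1 ≤ (pvScan k (a.drop i) (i : Int) ((a.take i).sum) st).1) := by
  intro d
  induction d with
  | zero =>
      intro i st hd hst
      have hlen : a.length ≤ i := by omega
      rw [List.drop_eq_nil_of_le hlen]
      refine ⟨Or.inl rfl, fun j hj hjn _ => by omega, le_refl _⟩
  | succ d ih =>
      intro i st hd hst
      rcases Nat.lt_or_ge i a.length with hi | hi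
      · rw [List.drop_eq_getElem_cons hi]
        have hsum : (a.take i).sum + a[i] = (a.take (i + 1)).sum := by
          rw [pv_sum_take_succ a i hi, List.getD_eq_getElem a 0 hi]
        have hcost : ((i : Int) + 1) * a[i] - ((a.take i).sum + a[i]) = pvC a (i + 1) := by
          simp only [pvC, Nat.add_sub_cancel]
          rw [← hsum, List.getD_eq_getElem a 0 hi]
          push_cast; ring
        have hcast : ((i : Int) + 1) = ((i + 1 : Nat) : Int) := by push_cast; ring
        simp only [pvScan]
        rw [hcost, hsum, hcast]
        by_cases ht : pvC a (i + 1) ≤ k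
        · rw [if_pos ht]
          obtain ⟨hv, hm, hmono⟩ := ih (i + 1) (((i + 1 : Nat) : Int), (a.take (i + 1)).sum)
            (by omega) (by simp)
          refine ⟨?_, ?_, ?_⟩
          · rcases hv with hv | ⟨j, hj1, hj2, hj3, hj4⟩
            · exact Or.inr ⟨i + 1, by omega, by omega, hv, ht⟩
            · exact Or.inr ⟨j, by omega, hj2, hj3, hj4⟩
          · intro j hj hjn hcj
            rcases Nat.lt_or_ge (i + 1) j with h | h
            · exact hm j h hjn hcj
            · have : j = i + 1 := by omega
              subst this
              exact le_trans (by simp) hmono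
          · exact le_trans (le_trans hst (by push_cast; omega)) hmono
        · rw [if_neg ht]
          obtain ⟨hv, hm, hmono⟩ := ih (i + 1) st (by omega) (by push_cast; omega)
          refine ⟨?_, ?_, hmono⟩
          · rcases hv with hv | ⟨j, hj1, hj2, hj3, hj4⟩
            · exact Or.inl hv
            · exact Or.inr ⟨j, by omega, hj2, hj3, hj4⟩
          · intro j hj hjn hcj
            rcases Nat.lt_or_ge (i + 1) j with h | h
            · exact hm j h hjn hcj
            · have : j = i + 1 := by omega
              exact absurd (this ▸ hcj) ht
      · rw [List.drop_eq_nil_of_le hi]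
        refine ⟨Or.inl rfl, fun j hj hjn _ => by omega, le_refl _⟩

lemma pv_main (a : List Int) (k : Int) (hk0 : 0 ≤ k)
    (hpw : ∀ p : Nat, ∀ hp1 : p + 1 < a.length, a[p]'(by omega) ≤ a[p + 1]) :
    (pvGet (0 :: a) (pvBisect (0 :: a) (0 :: pvAccum 0 a) k 0 (a.length : Int)) +
      (if pvBisect (0 :: a) (0 :: pvAccum 0 a) k 0 (a.length : Int) ≠ 0 then
        PySem.Int.floordiv
          (k - (pvBisect (0 :: a) (0 :: pvAccum 0 a) k 0 (a.length : Int) *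
                  pvGet (0 :: a) (pvBisect (0 :: a) (0 :: pvAccum 0 a) k 0 (a.length : Int)) -
                pvGet (0 :: pvAccum 0 a) (pvBisect (0 :: a) (0 :: pvAccum 0 a) k 0 (a.length : Int))))
          (pvBisect (0 :: a) (0 :: pvAccum 0 a) k 0 (a.length : Int))
      else 0)) =
    (if (pvScan k a 0 0 (0, 0)).1 = 0 then 0
     else pvGet a ((pvScan k a 0 0 (0, 0)).1 - 1) +
       PySem.Int.floordiv
         (k - ((pvScan k a 0 0 (0, 0)).1 * pvGet a ((pvScan k a 0 0 (0, 0)).1 - 1) -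
           (pvScan k a 0 0 (0, 0)).2)) (pvScan k a 0 0 (0, 0)).1) := by
  have hmono : ∀ i j : Int, 0 ≤ i → i ≤ j → j ≤ (a.length : Int) →
      i * pvGet (0 :: a) i - pvGet (0 :: pvAccum 0 a) i ≤
        j * pvGet (0 :: a) j - pvGet (0 :: pvAccum 0 a) j := by
    intro i j hi hij hj
    rw [pv_bridge a i hi (by omega), pv_bridge a j (by omega) hj]
    exact pvC_mono a hpw i.toNat j.toNat (by omega) (by omega)
  have hC0 : (0 : Int) * pvGet (0 :: a) 0 - pvGet (0 :: pvAccum 0 a) 0 = 0 := by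
    simp [pvGet]
  obtain ⟨hr1, hr2, hr3, hr4⟩ :=
    pvBisect_char (0 :: a) (0 :: pvAccum 0 a) k (a.length : Int) hmono 0 (a.length : Int)
      (by omega) (by omega) (by omega) (fun i hi0 hi => by omega) (fun i hi hin => by omega)
  obtain ⟨hv, hm, -⟩ := pvScan_char k a a.length 0 (0, 0) (by omega) (by simp)
  simp only [List.drop_zero, List.take_zero, List.sum_nil, Nat.cast_zero] at hv hm
  generalize hrg : pvBisect (0 :: a) (0 :: pvAccum 0 a) k 0 (a.length : Int) = r at hr1 hr2 hr3 hr4 ⊢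
  generalize hsg : pvScan k a 0 0 (0, 0) = st at hv hm ⊢
  have hr0 : 0 ≤ r := by
    by_contra h
    exact hr4 0 (by omega) (by exact_mod_cast Nat.cast_nonneg a.length) (by rw [hC0]; exact hk0)
  obtain ⟨j0, rfl⟩ : ∃ j0 : Nat, r = (j0 : Int) := ⟨r.toNat, by omega⟩
  have hj0n : j0 ≤ a.length := by exact_mod_cast hr2
  rcases hv with hv | ⟨j, hj1, hj2, hj3, hj4⟩
  · -- scan found nothing beyond index 0; then r = 0 and both sides are 0
    have hj00 : j0 = 0 := by
      by_contra h
      have hc : (j0 : Int) * pvGet (0 :: a) (j0 : Int) - pvGet (0 :: pvAccum 0 a) (j0 : Int) ≤ k :=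
        hr3 (j0 : Int) (by omega) (le_refl _)
      rw [pv_bridge a (j0 : Int) (by omega) (by exact_mod_cast hj0n)] at hc
      have := hm j0 (by omega) hj0n (by simpa using hc)
      rw [hv] at this
      simp at this
      omega
    subst hj00
    rw [hv]
    simp [pvGet]
  · -- scan found the rightmost j with cost ≤ k; then r = j and the tails coincide
    have hcj : (j : Int) * pvGet (0 :: a) (j : Int) - pvGet (0 :: pvAccum 0 a) (j : Int) ≤ k := by
      rw [pv_bridge a (j : Int) (by omega) (by exact_mod_cast hj2)]
      simpa using hj4
    have hjle : (j : Int) ≤ (j0 : Int) := by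
      by_contra h
      exact hr4 (j : Int) (by omega) (by exact_mod_cast hj2) hcj
    have hj0le : j0 ≤ j := by
      rcases Nat.eq_zero_or_pos j0 with h0 | h0
      · omega
      · have hc0 : (j0 : Int) * pvGet (0 :: a) (j0 : Int) - pvGet (0 :: pvAccum 0 a) (j0 : Int) ≤ k :=
          hr3 (j0 : Int) (by omega) (le_refl _)
        rw [pv_bridge a (j0 : Int) (by omega) (by exact_mod_cast hj0n)] at hc0
        have := hm j0 (by omega) hj0n (by simpa using hc0)
        rw [hj3] at this
        simp at this
        exact_mod_cast this
    have hjj : j0 = j := by omega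
    subst hjj
    rw [hj3]
    obtain ⟨m, rfl⟩ : ∃ m : Nat, j0 = m + 1 := ⟨j0 - 1, by omega⟩
    have hns : pvGet (0 :: a) ((m + 1 : Nat) : Int) = a.getD m 0 := by
      have h : ((m + 1 : Nat) : Int) = (m : Int) + 1 := by push_cast; ring
      rw [h]; exact pvGet_ns a m
    have hps : pvGet (0 :: pvAccum 0 a) ((m + 1 : Nat) : Int) = (a.take (m + 1)).sum :=
      pvGet_ps a (m + 1) hj2
    have hbne : ((m + 1 : Nat) : Int) ≠ 0 := by push_cast; omega
    rw [if_pos hbne,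
        if_neg (show ¬ ((((m + 1 : Nat) : Int), (a.take (m + 1)).sum).1 = 0) from by
          simpa using hbne)]
    have hav : pvGet a (((m + 1 : Nat) : Int) - 1) = a.getD m 0 := by
      have h : (((m + 1 : Nat) : Int) - 1) = ((m : Nat) : Int) := by push_cast; ring
      rw [h]
      simp [pvGet]
    simp only [hns, hps, hav]

-- ===== VERDICT (by name: the statement is the Claim_ definition above) =====
theorem maximizeMinValue_spec : Claim_equal_maximizeMinValue := by
  intro nums k _hdom hk
  unfold Spec_maximizeMinValue
  simp only [maximizeMinValue, maximizeMinValue_alt]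
  have hlen : (nums.length : Int) = ((PySem.List.sorted nums (fun x => x) false).length : Int) := by
    rw [PySem.List.length_sorted]
  rw [hlen]
  exact pv_main (PySem.List.sorted nums (fun x => x) false) k hk
    (fun p hp1 => PySem.List.sorted_id_getElem_mono nums (Nat.le_succ p) hp1)
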